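-- pv_equiv track=rewrite | github.com/VyacheslavZalygin/PyEducation2021 | Inf/test16.17.23.24/p11.py | process
-- ===== SOURCE A (Python) =====
-- def process(line):
--     table = {}
--     max_len = 0
--     count = 0
--     for i, letter in enumerate(line):
--         if letter == "A":
--             count += 1
--         if letter not in table:
--             table[letter] = i
--         else:
--             if max_len < i - table[letter]:
--                 max_len = i - table[letter]
--     return max_len if count < 25 else -1
-- ===== SOURCE B (Python) =====
-- def process(line):
--     chars = list(line)
--     if chars.count("A") >= 25:
--         return -1
--     n = len(chars)
--     rev = list(reversed(chars))
--     return max((n - 1 - rev.index(c) - chars.index(c) for c in set(chars)), default=0)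
-- ===== Notes on version B (the rewrite author's own statement) =====
-- stated objective: idiomatic
-- what changed: Replaces the single incremental pass that threads a first-index dict, a running max and a counter through enumerate(line) by a declarative form: one count of the letter A, then one max(...) over set(line) of last-minus-first occurrence gaps obtained with library index scans.
import Mathlib
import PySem

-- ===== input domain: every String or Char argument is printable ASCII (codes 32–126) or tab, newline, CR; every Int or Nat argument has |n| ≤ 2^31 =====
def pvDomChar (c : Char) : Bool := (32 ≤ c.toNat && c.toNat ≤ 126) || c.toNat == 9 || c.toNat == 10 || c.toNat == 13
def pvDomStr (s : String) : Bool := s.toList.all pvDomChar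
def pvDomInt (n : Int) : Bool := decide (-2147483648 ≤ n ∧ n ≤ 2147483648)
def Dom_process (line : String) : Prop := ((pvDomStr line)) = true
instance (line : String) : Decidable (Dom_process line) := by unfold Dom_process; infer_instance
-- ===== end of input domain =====

-- B replaces A's single dict-threading pass by an idiomatic declarative form:
-- count('A') once, then max over set(line) of (last occurrence - first occurrence) gaps.

-- ===== PORT A =====
-- single left-to-right pass: state = (table : first index of each char, max_len, count of 'A')
def process (line : String) : Int :=
  let fin := (PySem.List.enumerate line.toList 0).foldl
    (fun (st : PySem.Dict Char Int × Int × Int) p =>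
      let count := if p.2 == 'A' then st.2.2 + 1 else st.2.2
      if st.1.contains p.2 then
        -- table[letter] lookup: key is present here, so getD 0 is Python's exact table[letter]
        let g := p.1 - st.1.getD p.2 0
        (st.1, if st.2.1 < g then g else st.2.1, count)
      else
        (st.1.insert p.2 p.1, st.2.1, count))
    (PySem.Dict.empty, 0, 0)
  if fin.2.2 < 25 then fin.2.1 else -1

-- ===== PORT B =====
-- chars.index(c) / rev.index(c): c comes from set(chars) so .index never raises; the getD 0 arm is unreachable
def process_alt (line : String) : Int :=
  let chars := line.toList
  if 25 ≤ chars.count 'A' then -1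
  else
    let n : Int := chars.length
    let rev := chars.reverse
    PySem.List.maxD
      ((PySem.Set.ofList chars).map
        (fun c => n - 1 - ((PySem.List.index? rev c).getD 0 : Int) - ((PySem.List.index? chars c).getD 0 : Int)))
      (fun x => x) 0

-- ===== PRECONDITION & SPEC =====
def Spec_process (line : String) (out : Int) : Prop := out = process_alt line
instance (line : String) (out : Int) : Decidable (Spec_process line out) := by unfold Spec_process; infer_instance

-- ===== CLAIM (what is proved, stated in full; the proofs are below) =====
def Claim_equal_process : Prop := ∀ (line : String), Dom_process line → Spec_process line (process line)

-- ===== LEMMAS AND PROOFS =====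

-- last-minus-first occurrence gap of c in l
def pvGap (l : List Char) (c : Char) : Int :=
  (l.length : Int) - 1 - (List.idxOf c l.reverse : Int) - (List.idxOf c l : Int)

-- B's max expression in foldl-max form
def pvM (l : List Char) : Int := ((PySem.Set.ofList l).map (pvGap l)).foldl max 0

lemma pv_idxOf?_of_mem {l : List Char} {c : Char} (h : c ∈ l) :
    List.idxOf? c l = some (List.idxOf c l) := by
  induction l with
  | nil => cases h
  | cons a t ih =>
    by_cases hac : a = c
    · subst hac; simp [List.idxOf?_cons]
    · have hct : c ∈ t := by
        rcases (List.mem_cons.mp h) with h1 | h1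
        · exact absurd h1.symm hac
        · exact h1
      simp [List.idxOf?_cons, hac, ih hct, Option.map_some]

lemma pv_indexD_of_mem {l : List Char} {c : Char} (h : c ∈ l) :
    ((PySem.List.index? l c).getD 0 : Int) = (List.idxOf c l : Int) := by
  rw [PySem.List.index?_eq_idxOf?, pv_idxOf?_of_mem h]; rfl

lemma pv_idxOf_min {l : List Char} {c : Char} {k : Nat} (hk : k < l.length) (h : l[k] = c) :
    List.idxOf c l ≤ k := by
  have hmem : c ∈ l := h ▸ List.getElem_mem hk
  obtain ⟨hlt, hget, hmin⟩ := List.idxOf?_eq_some_iff.mp (pv_idxOf?_of_mem hmem)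
  by_contra hh
  push_neg at hh
  exact hmin k hh h

lemma pv_gap_nonneg {l : List Char} {c : Char} (h : c ∈ l) : 0 ≤ pvGap l c := by
  have hr : c ∈ l.reverse := List.mem_reverse.mpr h
  have hrlt : List.idxOf c l.reverse < l.reverse.length := List.idxOf_lt_length_of_mem hr
  have hlen : l.reverse.length = l.length := List.length_reverse
  have h2 : l[l.length - 1 - List.idxOf c l.reverse]'(by omega) = c := by
    rw [← List.getElem_reverse]; exact List.getElem_idxOf hrlt
  have h3 := pv_idxOf_min (by omega) h2
  unfold pvGap
  have h4 : List.idxOf c l.reverse < l.length := by omega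
  omega

lemma pv_gap_append_mem {l : List Char} {x c : Char} (hc : c ∈ l) :
    pvGap (l ++ [x]) c = if c = x then (l.length : Int) - (List.idxOf c l : Int) else pvGap l c := by
  have hrev : (l ++ [x]).reverse = x :: l.reverse := by simp
  have hidx : List.idxOf c (l ++ [x]) = List.idxOf c l := by
    rw [List.idxOf_append]; simp [hc]
  have hr : c ∈ l.reverse := List.mem_reverse.mpr hc
  have hrlt : List.idxOf c l.reverse < l.reverse.length := List.idxOf_lt_length_of_mem hr
  have hlen : l.reverse.length = l.length := List.length_reverse
  by_cases hcx : c = x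
  · subst hcx
    simp only [pvGap, hrev, hidx, List.idxOf_cons, BEq.rfl, cond_true]
    simp
  · have hxc : (x == c) = false := by simp [Ne.symm hcx]
    simp only [pvGap, hrev, hidx, List.idxOf_cons, hxc, cond_false, if_neg hcx]
    simp; omega

lemma pv_gap_append_self_not_mem {l : List Char} {x : Char} (hx : x ∉ l) :
    pvGap (l ++ [x]) x = 0 := by
  have hrev : (l ++ [x]).reverse = x :: l.reverse := by simp
  have hidx : List.idxOf x (l ++ [x]) = l.length := by
    rw [List.idxOf_append]; simp [hx]
  simp only [pvGap, hrev, hidx, List.idxOf_cons, BEq.rfl, cond_true]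
  simp

lemma pv_foldl_max_le {xs : List Int} {b : Int} (h0 : 0 ≤ b) (h : ∀ z ∈ xs, z ≤ b) :
    xs.foldl max 0 ≤ b := by
  rcases PySem.List.foldl_max_mem xs 0 with hm | hm
  · omega
  · exact h _ hm

lemma pvM_nonneg (l : List Char) : 0 ≤ pvM l := (PySem.List.le_foldl_max _ 0).1

lemma pv_mem_le_M {l : List Char} {z : Int} (h : z ∈ (PySem.Set.ofList l).map (pvGap l)) :
    z ≤ pvM l := (PySem.List.le_foldl_max _ 0).2 z h

lemma pvM_append_not_mem {l : List Char} {x : Char} (hx : x ∉ l) : pvM (l ++ [x]) = pvM l := by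
  have hset : PySem.Set.ofList (l ++ [x]) = PySem.Set.ofList l ++ [x] := by
    rw [PySem.Set.ofList_append_singleton, PySem.Set.add_of_not_mem]
    rw [PySem.Set.mem_ofList]; exact hx
  have hmap : (PySem.Set.ofList l).map (pvGap (l ++ [x])) = (PySem.Set.ofList l).map (pvGap l) := by
    refine List.map_congr_left (fun c hcs => ?_)
    have hc : c ∈ l := (PySem.Set.mem_ofList l c).mp hcs
    rw [pv_gap_append_mem hc, if_neg (fun hh => hx (by rw [← hh]; exact hc))]
  unfold pvM
  rw [hset, List.map_append, hmap, List.map_cons, List.map_nil, List.foldl_append]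
  simp only [List.foldl_cons, List.foldl_nil, pv_gap_append_self_not_mem hx]
  exact max_eq_left (pvM_nonneg l)

lemma pvM_append_mem {l : List Char} {x : Char} (hx : x ∈ l) :
    pvM (l ++ [x]) = max (pvM l) ((l.length : Int) - (List.idxOf x l : Int)) := by
  have hset : PySem.Set.ofList (l ++ [x]) = PySem.Set.ofList l := by
    rw [PySem.Set.ofList_append_singleton, PySem.Set.add_of_mem]
    rw [PySem.Set.mem_ofList]; exact hx
  have hgapx : pvGap (l ++ [x]) x = (l.length : Int) - (List.idxOf x l : Int) := by
    rw [pv_gap_append_mem hx, if_pos rfl]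
  have hgap_le : pvGap l x ≤ (l.length : Int) - (List.idxOf x l : Int) := by
    have hr : x ∈ l.reverse := List.mem_reverse.mpr hx
    have := List.idxOf_lt_length_of_mem hr
    unfold pvGap; omega
  apply le_antisymm
  · refine pv_foldl_max_le (le_trans (pvM_nonneg l) (le_max_left _ _)) (fun z hz => ?_)
    rw [hset] at hz
    obtain ⟨c, hcs, hcz⟩ := List.mem_map.mp hz
    have hc : c ∈ l := (PySem.Set.mem_ofList l c).mp hcs
    rw [pv_gap_append_mem hc] at hcz
    by_cases hcx : c = x
    · rw [if_pos hcx, hcx] at hcz; exact hcz ▸ le_max_right _ _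
    · rw [if_neg hcx] at hcz
      exact le_trans (hcz ▸ pv_mem_le_M (List.mem_map.mpr ⟨c, hcs, rfl⟩)) (le_max_left _ _)
  · have hxin : pvGap (l ++ [x]) x ∈ (PySem.Set.ofList (l ++ [x])).map (pvGap (l ++ [x])) := by
      rw [hset]
      exact List.mem_map.mpr ⟨x, (PySem.Set.mem_ofList l x).mpr hx, rfl⟩
    have hxle : (l.length : Int) - (List.idxOf x l : Int) ≤ pvM (l ++ [x]) :=
      hgapx ▸ pv_mem_le_M hxin
    refine max_le (pv_foldl_max_le (pvM_nonneg _) (fun z hz => ?_)) hxle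
    obtain ⟨c, hcs, hcz⟩ := List.mem_map.mp hz
    have hc : c ∈ l := (PySem.Set.mem_ofList l c).mp hcs
    by_cases hcx : c = x
    · subst hcx; exact le_trans (hcz ▸ hgap_le) hxle
    · have : pvGap (l ++ [x]) c = pvGap l c := by rw [pv_gap_append_mem hc, if_neg hcx]
      refine le_trans (le_of_eq hcz.symm) (this ▸ pv_mem_le_M ?_)
      rw [hset]
      exact List.mem_map.mpr ⟨c, hcs, rfl⟩

-- the loop of port A
def pvStep (st : PySem.Dict Char Int × Int × Int) (p : Int × Char) : PySem.Dict Char Int × Int × Int :=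
  let count := if p.2 == 'A' then st.2.2 + 1 else st.2.2
  if st.1.contains p.2 then
    let g := p.1 - st.1.getD p.2 0
    (st.1, if st.2.1 < g then g else st.2.1, count)
  else
    (st.1.insert p.2 p.1, st.2.1, count)

def pvSt (l : List Char) : PySem.Dict Char Int × Int × Int :=
  (PySem.List.enumerate l 0).foldl pvStep (PySem.Dict.empty, 0, 0)

lemma pvSt_append (l : List Char) (x : Char) :
    pvSt (l ++ [x]) = pvStep (pvSt l) ((l.length : Int), x) := by
  unfold pvSt
  rw [PySem.List.enumerate_append, List.foldl_append]
  simp [PySem.List.enumerate_cons, PySem.List.enumerate_nil]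

lemma pv_inv (l : List Char) :
    (pvSt l).2.1 = pvM l ∧ (pvSt l).2.2 = (l.count 'A' : Int) ∧
    (∀ c, (pvSt l).1.contains c = decide (c ∈ l)) ∧
    (∀ c ∈ l, (pvSt l).1.getD c 0 = (List.idxOf c l : Int)) := by
  induction l using List.reverseRecOn with
  | nil =>
    refine ⟨rfl, rfl, fun c => by simp [pvSt, PySem.List.enumerate_nil, PySem.Dict.contains_empty], fun c hc => by cases hc⟩
  | append_singleton l x ih =>
    obtain ⟨ihM, ihC, ihK, ihV⟩ := ih
    rw [pvSt_append]
    have hcnt : (if (x == 'A') then (pvSt l).2.2 + 1 else (pvSt l).2.2) = ((l ++ [x]).count 'A' : Int) := by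
      rw [ihC, List.count_append]
      by_cases hA : x = 'A' <;> simp [hA]
    by_cases hx : x ∈ l
    · have hctrue : (pvSt l).1.contains x = true := by rw [ihK]; simpa using hx
      have hg : (l.length : Int) - (pvSt l).1.getD x 0 = (l.length : Int) - (List.idxOf x l : Int) := by
        rw [ihV x hx]
      refine ⟨?_, ?_, ?_, ?_⟩ <;> simp only [pvStep, hctrue, if_true]
      · rw [ihM, hg, pvM_append_mem hx]
        rcases lt_or_ge (pvM l) ((l.length : Int) - (List.idxOf x l : Int)) with hlt | hge
        · simp [hlt, max_eq_right hlt.le]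
        · rw [if_neg (not_lt.mpr hge), max_eq_left hge]
      · exact hcnt
      · intro c
        rw [ihK c, decide_eq_decide]
        simp only [List.mem_append, List.mem_singleton]
        exact ⟨Or.inl, fun h => h.elim id (fun hcx => hcx ▸ hx)⟩
      · intro c hc
        have hcl : c ∈ l := by
          rcases List.mem_append.mp hc with h1 | h1
          · exact h1
          · rw [List.mem_singleton.mp h1]; exact hx
        rw [ihV c hcl, List.idxOf_append]
        simp [hcl]
    · have hcfalse : (pvSt l).1.contains x = false := by rw [ihK]; simpa using hx
      refine ⟨?_, ?_, ?_, ?_⟩ <;> simp only [pvStep, hcfalse, if_false, Bool.false_eq_true]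
      · rw [ihM, pvM_append_not_mem hx]
      · exact hcnt
      · intro c
        rw [PySem.Dict.contains_insert, ihK c]
        by_cases hcx : c = x
        · subst hcx; simp
        · simp [hcx, List.mem_append]
      · intro c hc
        rw [PySem.Dict.getD_insert]
        by_cases hcx : c = x
        · subst hcx
          rw [if_pos rfl, List.idxOf_append]
          simp [hx]
        · have hcl : c ∈ l := by
            rcases List.mem_append.mp hc with h1 | h1
            · exact h1
            · exact absurd (List.mem_singleton.mp h1) hcx
          rw [if_neg hcx, ihV c hcl, List.idxOf_append]
          simp [hcl]

lemma pv_maxD_eq (l : List Char) :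
    PySem.List.maxD ((PySem.Set.ofList l).map (pvGap l)) (fun x => x) 0 = pvM l := by
  rcases hs : (PySem.Set.ofList l).map (pvGap l) with _ | ⟨z, t⟩
  · have h0 : PySem.List.maxD ([] : List Int) (fun x => x) 0 = 0 := rfl
    rw [h0]
    simp [pvM, hs]
  · have hz : z ∈ (PySem.Set.ofList l).map (pvGap l) := by rw [hs]; exact List.mem_cons_self
    obtain ⟨c, hcs, hcz⟩ := List.mem_map.mp hz
    have h0z : 0 ≤ z := hcz ▸ pv_gap_nonneg ((PySem.Set.mem_ofList l c).mp hcs)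
    have hmaxD : PySem.List.maxD (z :: t) (fun x : Int => x) 0 =
        (PySem.List.max? (z :: t) (fun x : Int => x)).getD 0 := rfl
    rw [hmaxD, PySem.List.max?_id_cons]
    simp only [pvM, hs, List.foldl_cons, Option.getD_some]
    rw [max_eq_right h0z]

lemma pv_processB_map (l : List Char) :
    (PySem.Set.ofList l).map
      (fun c => (l.length : Int) - 1 - ((PySem.List.index? l.reverse c).getD 0 : Int)
        - ((PySem.List.index? l c).getD 0 : Int)) = (PySem.Set.ofList l).map (pvGap l) := by
  refine List.map_congr_left (fun c hcs => ?_)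
  have hc : c ∈ l := (PySem.Set.mem_ofList l c).mp hcs
  rw [pv_indexD_of_mem hc, pv_indexD_of_mem (List.mem_reverse.mpr hc)]
  rfl

-- ===== VERDICT (by name: the statement is the Claim_ definition above) =====
theorem process_spec : Claim_equal_process := by
  intro line _
  unfold Spec_process
  obtain ⟨hM, hC, -, -⟩ := pv_inv line.toList
  have hA : process line = if (pvSt line.toList).2.2 < 25 then (pvSt line.toList).2.1 else -1 := rfl
  rw [hA, hM, hC]
  unfold process_alt
  simp only []
  by_cases hc : 25 ≤ line.toList.count 'A'
  · rw [if_pos hc, if_neg (by exact_mod_cast not_lt.mpr (by exact_mod_cast hc))]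
  · rw [if_neg hc, if_pos (by exact_mod_cast lt_of_not_ge hc)]
    rw [pv_processB_map, pv_maxD_eq]
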